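-- pv_equiv track=rewrite | github.com/leanhtucc/codePythonPro | bt list 07.py | swap_even_and_odd_positions
-- ===== SOURCE A (Python) =====
-- def swap_even_and_odd_positions(arr):
--     length = len(arr)
--     if length % 2 == 0:
--         end = length
--     else:
--         end = length - 1
--
--     for i in range(0, end, 2):
--         arr[i], arr[i + 1] = arr[i + 1], arr[i]
--
--     return arr
-- ===== SOURCE B (Python) =====
-- def swap_even_and_odd_positions(arr):
--     it = iter(arr)
--     res = [x for a, b in zip(it, it) for x in (b, a)]
--     if len(arr) % 2 == 1:
--         res.append(arr[-1])
--     arr[:] = res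
--     return arr
-- ===== Notes on version B (the rewrite author's own statement) =====
-- stated objective: alternative
-- what changed: A walks even indices and swaps pairs in place with index assignments; B consumes the list two elements at a time via a paired iterator, builds the swapped list functionally, re-appends the odd trailing element, and writes it back with slice assignment.
import Mathlib
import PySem

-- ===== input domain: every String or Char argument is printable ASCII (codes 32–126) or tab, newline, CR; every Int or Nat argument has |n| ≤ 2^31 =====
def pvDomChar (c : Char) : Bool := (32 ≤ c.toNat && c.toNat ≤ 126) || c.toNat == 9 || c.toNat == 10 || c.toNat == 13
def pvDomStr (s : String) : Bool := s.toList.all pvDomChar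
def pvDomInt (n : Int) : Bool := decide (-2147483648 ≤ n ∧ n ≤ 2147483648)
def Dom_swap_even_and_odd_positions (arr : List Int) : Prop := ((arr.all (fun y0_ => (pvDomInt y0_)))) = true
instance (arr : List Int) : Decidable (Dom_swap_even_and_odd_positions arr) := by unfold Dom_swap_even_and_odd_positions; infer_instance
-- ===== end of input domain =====

-- B builds the swapped list functionally by consuming the input two elements at a time
-- (iterator pairing) instead of A's in-place index swaps; same cost, different decomposition.
-- Both A and B mutate the caller's list in Python; the equivalence proved here is about the return value.


-- ===== PORT A =====
-- loop body of A: arr[i], arr[i+1] = arr[i+1], arr[i]  (RHS pair first, then the two stores;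
-- pyGetD is exact here: every i the loop visits has i and i+1 in range)
def stepA (acc : List Int) (i : Int) : List Int :=
  let t : Int × Int := (PySem.List.pyGetD acc (i + 1) 0, PySem.List.pyGetD acc i 0)
  (acc.set i.toNat t.1).set (i + 1).toNat t.2

def swap_even_and_odd_positions (arr : List Int) : List Int :=
  let length : Int := arr.length
  let e : Int := if length % 2 == 0 then length else length - 1
  (PySem.List.pyRange 0 e 2).foldl stepA arr

-- ===== PORT B =====
-- zip(it, it) on one iterator: the list chopped into consecutive pairs (odd tail dropped)
def pairsB : List Int → List (Int × Int)
  | a :: b :: l => (a, b) :: pairsB l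
  | _ => []

def swap_even_and_odd_positions_alt (arr : List Int) : List Int :=
  let res := (pairsB arr).flatMap (fun p => [p.2, p.1])
  if (arr.length : Int) % 2 == 1 then res ++ [PySem.List.pyGetD arr (-1) 0] else res

-- ===== PRECONDITION & SPEC =====
def Spec_swap_even_and_odd_positions (arr : List Int) (out : List Int) : Prop := out = swap_even_and_odd_positions_alt arr
instance (arr : List Int) (out : List Int) : Decidable (Spec_swap_even_and_odd_positions arr out) := by unfold Spec_swap_even_and_odd_positions; infer_instance

-- ===== CLAIM (what is proved, stated in full; the proofs are below) =====
def Claim_equal_swap_even_and_odd_positions : Prop := ∀ (arr : List Int), Dom_swap_even_and_odd_positions arr → Spec_swap_even_and_odd_positions arr (swap_even_and_odd_positions arr)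

-- ===== LEMMAS AND PROOFS =====

-- reference function: swap consecutive pairs, leave the odd tail
def pairSwap : List Int → List Int
  | [] => []
  | [a] => [a]
  | a :: b :: l => b :: a :: pairSwap l

lemma pyRange_two_nil (a b : Int) (h : b ≤ a) : PySem.List.pyRange a b 2 = [] := by
  rw [PySem.List.pyRange_of_pos a b (by norm_num)]
  simp [if_neg (not_lt.mpr h)]

lemma pyRange_two_cons (a b : Int) (h : a < b) :
    PySem.List.pyRange a b 2 = a :: PySem.List.pyRange (a + 2) b 2 := by
  rw [PySem.List.pyRange_of_pos a b (by norm_num),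
      PySem.List.pyRange_of_pos (a + 2) b (by norm_num)]
  have hc : (if a < b then ((b - a + 2 - 1) / 2).toNat else 0)
      = (if a + 2 < b then ((b - (a + 2) + 2 - 1) / 2).toNat else 0) + 1 := by
    split_ifs <;> omega
  rw [hc, List.range_succ_eq_map]
  simp only [List.map_cons, List.map_map]
  congr 1
  · push_cast; ring
  · apply List.map_congr_left
    intro k _
    simp only [Function.comp_apply, Nat.succ_eq_add_one]
    push_cast; ring

lemma stepA_mid (pre l : List Int) (a b : Int) :
    stepA (pre ++ a :: b :: l) (pre.length : Int) = (pre ++ [b, a]) ++ l := by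
  unfold stepA
  have h1 : PySem.List.pyGetD (pre ++ a :: b :: l) ((pre.length : Int) + 1) 0 = b := by
    have hcast : ((pre.length : Int) + 1) = ((pre.length + 1 : Nat) : Int) := by push_cast; ring
    rw [hcast, PySem.List.pyGetD_natCast, List.getD_eq_getElem?_getD,
        List.getElem?_append_right (by omega)]
    simp
  have h0 : PySem.List.pyGetD (pre ++ a :: b :: l) ((pre.length : Int)) 0 = a := by
    rw [PySem.List.pyGetD_natCast, List.getD_eq_getElem?_getD,
        List.getElem?_append_right (le_refl _)]
    simp
  have ht0 : ((pre.length : Int)).toNat = pre.length := by omega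
  have ht1 : ((pre.length : Int) + 1).toNat = pre.length + 1 := by omega
  simp only [h0, h1, ht0, ht1]
  rw [List.set_append, if_neg (by omega)]
  rw [List.set_append, if_neg (by omega)]
  simp [List.append_assoc]

lemma loopA : ∀ (suf pre : List Int),
    (PySem.List.pyRange (pre.length : Int)
        ((pre.length : Int) + 2 * ((suf.length / 2 : Nat) : Int)) 2).foldl stepA (pre ++ suf)
      = pre ++ pairSwap suf := by
  intro suf
  induction suf using pairSwap.induct with
  | case1 =>
    intro pre
    rw [pyRange_two_nil _ _ (by simp)]
    simp [pairSwap]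
  | case2 a =>
    intro pre
    rw [pyRange_two_nil _ _ (by simp)]
    simp [pairSwap]
  | case3 a b l ih =>
    intro pre
    have hlen : (a :: b :: l).length / 2 = l.length / 2 + 1 := by
      simp only [List.length_cons]; omega
    have hb : (pre.length : Int) < (pre.length : Int) + 2 * (((a :: b :: l).length / 2 : Nat) : Int) := by
      rw [hlen]; push_cast; omega
    rw [pyRange_two_cons _ _ hb, List.foldl_cons, stepA_mid]
    have h2 : (pre.length : Int) + 2 = (((pre ++ [b, a]).length : Nat) : Int) := by
      simp [List.length_append]
    have h3 : (pre.length : Int) + 2 * (((a :: b :: l).length / 2 : Nat) : Int)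
        = (((pre ++ [b, a]).length : Nat) : Int) + 2 * ((l.length / 2 : Nat) : Int) := by
      rw [hlen]; simp [List.length_append]; ring
    rw [h2, h3, ih (pre ++ [b, a])]
    simp [pairSwap, List.append_assoc]

lemma a_eq_pairSwap (arr : List Int) : swap_even_and_odd_positions arr = pairSwap arr := by
  unfold swap_even_and_odd_positions
  have he : (if ((arr.length : Int) % 2 == 0) then (arr.length : Int) else (arr.length : Int) - 1)
      = 0 + 2 * ((arr.length / 2 : Nat) : Int) := by
    split_ifs with h
    · simp only [beq_iff_eq] at h; push_cast; omega
    · simp only [beq_iff_eq] at h; push_cast; omega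
  simp only []
  rw [he]
  have := loopA arr []
  simpa using this

lemma b_eq_pairSwap (arr : List Int) : swap_even_and_odd_positions_alt arr = pairSwap arr := by
  induction arr using pairSwap.induct with
  | case1 => simp [swap_even_and_odd_positions_alt, pairsB, pairSwap]
  | case2 a =>
    simp only [swap_even_and_odd_positions_alt, pairsB, pairSwap]
    rw [show PySem.List.pyGetD [a] (-1) 0 = [a].getLast (by simp) from
          PySem.List.pyGetD_neg_one _ 0 (by simp)]
    simp
  | case3 a b l ih =>
    simp only [swap_even_and_odd_positions_alt, pairsB, pairSwap, List.flatMap_cons] at ih ⊢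
    by_cases hodd : (l.length : Int) % 2 = 1
    · have hne : l ≠ [] := by
        intro hnil; rw [hnil] at hodd; simp at hodd
      have hc1 : (((a :: b :: l).length : Int) % 2 == 1) = true := by
        simp only [List.length_cons, beq_iff_eq]; push_cast; omega
      have hc2 : (((l).length : Int) % 2 == 1) = true := by simp [hodd]
      rw [hc2, if_pos rfl] at ih
      rw [hc1, if_pos rfl]
      have hlast : PySem.List.pyGetD (a :: b :: l) (-1) 0 = PySem.List.pyGetD l (-1) 0 := by
        rw [show PySem.List.pyGetD (a :: b :: l) (-1) 0 = (a :: b :: l).getLast (by simp) from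
              PySem.List.pyGetD_neg_one _ 0 (by simp),
            show PySem.List.pyGetD l (-1) 0 = l.getLast hne from
              PySem.List.pyGetD_neg_one _ 0 hne]
        simp [List.getLast_cons hne]
      rw [hlast, ← ih]
      simp
    · have hc1 : (((a :: b :: l).length : Int) % 2 == 1) = false := by
        simp only [List.length_cons, beq_eq_false_iff_ne, ne_eq]; push_cast; omega
      have hc2 : (((l).length : Int) % 2 == 1) = false := by simp [hodd]
      rw [hc2, if_neg (by simp)] at ih
      rw [hc1, if_neg (by simp)]
      rw [← ih]
      simp

-- ===== VERDICT (by name: the statement is the Claim_ definition above) =====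
theorem swap_even_and_odd_positions_spec : Claim_equal_swap_even_and_odd_positions := by
  intro arr _
  unfold Spec_swap_even_and_odd_positions
  rw [a_eq_pairSwap, b_eq_pairSwap]
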